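-- pv_equiv track=rewrite | github.com/c0pperdragon/BreadBin | tools/asm.py | evaluate
-- ===== SOURCE A (Python) =====
-- class AssemblerException(Exception):
--     pass
--
-- def evaluate(identifiers, s):
--     try:
--         if s in identifiers:
--             return identifiers[s]
--         elif len(s)>0 and s[0]=='.':
--             return evaluate(identifiers, s[1:]) & 0xff
--         elif len(s)>0 and s[0]=='^':
--             return (evaluate(identifiers, s[1:]) >> 8) & 0xff
--         elif len(s)>0 and s[0]=='$':
--             v = int(s[1:],16)
--             return v
--         else:
--             return int(s,10)
--     except ValueError as e:
--         raise AssemblerException("Can not parse number "+s)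
-- ===== SOURCE B (Python) =====
-- class AssemblerException(Exception):
--     pass
--
-- def evaluate(identifiers, s):
--     # iterative: strip prefix operators into an op list, then fold them innermost-first
--     ops = []
--     while True:
--         if s in identifiers:
--             base = identifiers[s]
--             break
--         if s and s[0] == '.':
--             ops.append(0)
--             s = s[1:]
--         elif s and s[0] == '^':
--             ops.append(1)
--             s = s[1:]
--         else:
--             try:
--                 base = int(s[1:], 16) if (s and s[0] == '$') else int(s, 10)
--             except ValueError:
--                 raise AssemblerException("Can not parse number " + s)
--             break
--     for op in reversed(ops):
--         if op == 0:
--             base = base & 0xff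
--         else:
--             base = (base >> 8) & 0xff
--     return base
-- ===== Notes on version B (the rewrite author's own statement) =====
-- stated objective: alternative
-- what changed: Replaces A's recursion (one stack frame per prefix operator, masks applied on the way back out) by a single iterative loop that strips prefix operators into an explicit op list and then folds that list over the parsed base in reverse (innermost-first) order.
import Mathlib
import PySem

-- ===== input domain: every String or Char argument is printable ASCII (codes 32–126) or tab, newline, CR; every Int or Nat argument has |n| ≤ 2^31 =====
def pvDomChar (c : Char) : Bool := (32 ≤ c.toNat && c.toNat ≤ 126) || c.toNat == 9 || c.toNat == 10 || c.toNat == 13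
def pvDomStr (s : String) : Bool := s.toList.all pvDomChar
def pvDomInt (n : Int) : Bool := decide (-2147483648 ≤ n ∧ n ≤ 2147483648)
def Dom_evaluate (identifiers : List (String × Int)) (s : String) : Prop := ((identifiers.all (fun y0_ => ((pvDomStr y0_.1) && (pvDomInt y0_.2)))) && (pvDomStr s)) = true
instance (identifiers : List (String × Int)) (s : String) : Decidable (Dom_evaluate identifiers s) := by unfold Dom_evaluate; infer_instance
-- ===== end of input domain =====

-- B replaces A's recursion by an iterative operator-stripping loop plus a reverse fold of the
-- collected operators (objective: alternative decomposition, same cost). Equivalence is about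
-- return values; inputs on which A raises AssemblerException are excluded by Pre_evaluate.

-- ===== PORT A =====
-- literal transliteration of A's recursion (Option Int: none = the frame raises)
def evaluateCore (identifiers : List (String × Int)) : List Char → Option Int
  | [] =>
    match identifiers.lookup (String.ofList []) with
    | some v => some v
    | none => PySem.Int.ofChars? []          -- int("", 10): ValueError → none
  | c :: rest =>
    match identifiers.lookup (String.ofList (c :: rest)) with
    | some v => some v
    | none =>
      if c = '.' then (evaluateCore identifiers rest).map (fun v => PySem.Int.band v 0xff)
      else if c = '^' then (evaluateCore identifiers rest).map (fun (v : Int) => PySem.Int.band (v >>> (8:Nat)) 0xff)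
      else if c = '$' then PySem.Int.ofCharsBase? rest 16
      else PySem.Int.ofChars? (c :: rest)

def evaluate (identifiers : List (String × Int)) (s : String) : Int :=
  (evaluateCore identifiers s.toList).getD 0   -- the none case (A raises) is outside Pre_evaluate

-- ===== PORT B =====
def applyOp (b : Int) (op : Int) : Int :=
  if op = 0 then PySem.Int.band b 0xff else PySem.Int.band (b >>> (8:Nat)) 0xff

-- the while-loop of Source B: strips operators into ops, returns (base, ops); none = raise
def evaluateLoop (identifiers : List (String × Int)) : List Char → List Int → Option (Int × List Int)
  | cs, ops =>
    match identifiers.lookup (String.ofList cs) with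
    | some v => some (v, ops)
    | none =>
      match cs with
      | [] => (PySem.Int.ofChars? []).map (fun b => (b, ops))
      | c :: rest =>
        if c = '.' then evaluateLoop identifiers rest (ops ++ [0])
        else if c = '^' then evaluateLoop identifiers rest (ops ++ [1])
        else (if c = '$' then PySem.Int.ofCharsBase? rest 16
              else PySem.Int.ofChars? (c :: rest)).map (fun b => (b, ops))

def evaluate_alt (identifiers : List (String × Int)) (s : String) : Int :=
  match evaluateLoop identifiers s.toList [] with
  | none => 0                                   -- raising inputs are outside Pre_evaluate
  | some (base, ops) => ops.reverse.foldl applyOp base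

-- ===== PRECONDITION & SPEC =====
-- Pre_: exactly the inputs on which the Python A returns (no AssemblerException): there is a
-- stripping point i such that every earlier suffix is not an identifier and starts with '.'/'^',
-- and at i the suffix is an identifier, or a '$'-hex literal, or a decimal literal.
def Pre_evaluate (identifiers : List (String × Int)) (s : String) : Prop :=
  ∃ i < s.toList.length + 1,
    (∀ j < i, (identifiers.lookup (String.ofList (s.toList.drop j))).isNone = true ∧
              (s.toList.getD j ' ' = '.' ∨ s.toList.getD j ' ' = '^')) ∧
    ((identifiers.lookup (String.ofList (s.toList.drop i))).isSome = true ∨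
     (i < s.toList.length ∧ s.toList.getD i ' ' = '$' ∧
        (PySem.Int.ofCharsBase? (s.toList.drop (i + 1)) 16).isSome = true) ∨
     (PySem.Int.ofChars? (s.toList.drop i)).isSome = true)
instance (identifiers : List (String × Int)) (s : String) : Decidable (Pre_evaluate identifiers s) := by
  unfold Pre_evaluate; infer_instance

def pvWitness_evaluate : (List (String × Int)) × String := ([("x", 300)], ".x")

def Spec_evaluate (identifiers : List (String × Int)) (s : String) (out : Int) : Prop := out = evaluate_alt identifiers s
instance (identifiers : List (String × Int)) (s : String) (out : Int) : Decidable (Spec_evaluate identifiers s out) := by unfold Spec_evaluate; infer_instance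

-- ===== CLAIM (what is proved, stated in full; the proofs are below) =====
def Claim_equal_evaluate : Prop := ∀ (identifiers : List (String × Int)) (s : String), Dom_evaluate identifiers s → Pre_evaluate identifiers s → Spec_evaluate identifiers s (evaluate identifiers s)

-- ===== LEMMAS AND PROOFS =====

-- the loop with pending ops computes the recursion's value with those ops folded on afterwards
theorem evaluateLoop_eq (identifiers : List (String × Int)) :
    ∀ (cs : List Char) (ops : List Int),
      (evaluateLoop identifiers cs ops).map (fun p => p.2.reverse.foldl applyOp p.1)
        = (evaluateCore identifiers cs).map (fun v => ops.reverse.foldl applyOp v) := by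
  intro cs
  induction cs with
  | nil =>
    intro ops
    simp only [evaluateLoop, evaluateCore]
    cases identifiers.lookup (String.ofList []) with
    | some v => rfl
    | none => cases PySem.Int.ofChars? ([] : List Char) <;> rfl
  | cons c rest ih =>
    intro ops
    simp only [evaluateLoop, evaluateCore]
    cases identifiers.lookup (String.ofList (c :: rest)) with
    | some v => rfl
    | none =>
      by_cases h1 : c = '.'
      · simp only [h1, reduceIte]
        rw [ih (ops ++ [0])]
        cases evaluateCore identifiers rest with
        | none => rfl
        | some v =>
          simp only [Option.map_some]
          congr 1
          simp [List.reverse_append, applyOp]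
      · by_cases h2 : c = '^'
        · simp only [h2, if_neg (show ¬('^':Char) = '.' by decide), reduceIte]
          rw [ih (ops ++ [1])]
          cases evaluateCore identifiers rest with
          | none => rfl
          | some v =>
            simp only [Option.map_some]
            congr 1
            simp [List.reverse_append, applyOp]
        · simp only [if_neg h1, if_neg h2]
          by_cases h3 : c = '$'
          · simp only [h3, reduceIte]
            cases PySem.Int.ofCharsBase? rest 16 <;> rfl
          · simp only [if_neg h3]
            cases PySem.Int.ofChars? (c :: rest) <;> rfl

theorem evaluate_eq_alt (identifiers : List (String × Int)) (s : String) :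
    evaluate identifiers s = evaluate_alt identifiers s := by
  unfold evaluate evaluate_alt
  have h := evaluateLoop_eq identifiers s.toList []
  cases hl : evaluateLoop identifiers s.toList [] with
  | none =>
    rw [hl] at h
    cases hc : evaluateCore identifiers s.toList <;> rw [hc] at h <;> simp_all
  | some p =>
    rw [hl] at h
    cases hc : evaluateCore identifiers s.toList with
    | none => rw [hc] at h; simp_all
    | some v =>
      rw [hc] at h
      simp only [Option.map_some, Option.some.injEq] at h
      simp [h]

-- ===== VERDICT (by name: the statement is the Claim_ definition above) =====
theorem evaluate_spec : Claim_equal_evaluate := by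
  intro identifiers s _ _
  unfold Spec_evaluate
  exact evaluate_eq_alt identifiers s
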